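-- pv_equiv track=rewrite | github.com/cpccu/cpccu-contest-3 | E/48945459_WA_Rafi151_E.py | max_potions
-- ===== SOURCE A (Python) =====
-- def max_potions(n, potions):
--     max_potions_drunk = 0
--     current_health = 0
--
--     for potion in potions:
--         current_health += potion
--         if current_health >= 0:
--             max_potions_drunk += 1
--         else:
--             break
--
--     return max_potions_drunk
-- ===== SOURCE B (Python) =====
-- def max_potions(n, potions):
--     # Stage 1: prefix sums.
--     sums = []
--     t = 0
--     for p in potions:
--         t += p
--         sums.append(t)
--     # Stage 2: running minima of the prefix sums (a non-increasing array).
--     mins = []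
--     m = None
--     for s in sums:
--         if m is None or s < m:
--             m = s
--         mins.append(m)
--     # Stage 3: mins is non-increasing, so binary-search the first index with mins[i] < 0.
--     lo, hi = 0, len(mins)
--     while lo < hi:
--         mid = (lo + hi) // 2
--         if mins[mid] >= 0:
--             lo = mid + 1
--         else:
--             hi = mid
--     return lo
-- ===== Notes on version B (the rewrite author's own statement) =====
-- stated objective: alternative
-- what changed: Instead of one scan that accumulates health and breaks at the first negative, B builds the prefix-sum array, then its running-minimum array (which is non-increasing), and binary-searches that monotone array for the first negative entry.
import Mathlib
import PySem

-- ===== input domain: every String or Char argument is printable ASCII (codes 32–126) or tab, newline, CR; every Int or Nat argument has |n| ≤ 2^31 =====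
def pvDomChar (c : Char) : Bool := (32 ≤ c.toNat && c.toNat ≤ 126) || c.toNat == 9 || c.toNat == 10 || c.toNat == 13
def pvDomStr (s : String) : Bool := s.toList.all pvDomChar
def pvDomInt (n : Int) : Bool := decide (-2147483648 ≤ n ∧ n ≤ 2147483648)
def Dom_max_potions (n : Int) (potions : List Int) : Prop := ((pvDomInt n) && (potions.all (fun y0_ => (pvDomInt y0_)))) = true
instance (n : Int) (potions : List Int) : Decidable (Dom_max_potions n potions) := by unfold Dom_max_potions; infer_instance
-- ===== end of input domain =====

-- B replaces A's accumulate-and-break scan with staged arrays (prefix sums, their running minima)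
-- and a binary search for the first negative running minimum; alternative algorithm, same values.

-- ===== PORT A =====
-- A's loop with break: state (max_potions_drunk, current_health), recursion over potions.
def maxPotionsLoop : List Int → Int → Int → Int
  | [], cnt, _ => cnt
  | p :: ps, cnt, h =>
      let h' := h + p
      if h' ≥ 0 then maxPotionsLoop ps (cnt + 1) h' else cnt

def max_potions (n : Int) (potions : List Int) : Int :=
  maxPotionsLoop potions 0 0

-- ===== PORT B =====
-- Stage 1: prefix sums (Source B's first loop, accumulator t).
def prefixSums (t : Int) : List Int → List Int
  | [] => []
  | p :: ps => (t + p) :: prefixSums (t + p) ps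

-- Stage 2: running minima (Source B's second loop; m starts as None).
def runMins : List Int → Option Int → List Int
  | [], _ => []
  | s :: ss, none => s :: runMins ss (some s)
  | s :: ss, some m => let m' := if s < m then s else m; m' :: runMins ss (some m')

-- Stage 3: binary search (Source B's while loop); mins[mid] is always in range there,
-- so getD with default 0 is exact for this port.
def bsearchNeg (mins : List Int) (lo hi : Nat) : Nat :=
  if _h : lo < hi then
    let mid := (lo + hi) / 2
    if mins.getD mid 0 ≥ 0 then bsearchNeg mins (mid + 1) hi else bsearchNeg mins lo mid
  else lo
termination_by hi - lo
decreasing_by all_goals omega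

def max_potions_alt (n : Int) (potions : List Int) : Int :=
  let mins := runMins (prefixSums 0 potions) none
  (bsearchNeg mins 0 mins.length : Int)

-- ===== PRECONDITION & SPEC =====
def Spec_max_potions (n : Int) (potions : List Int) (out : Int) : Prop := out = max_potions_alt n potions
instance (n : Int) (potions : List Int) (out : Int) : Decidable (Spec_max_potions n potions out) := by unfold Spec_max_potions; infer_instance

-- ===== CLAIM (what is proved, stated in full; the proofs are below) =====
def Claim_equal_max_potions : Prop := ∀ (n : Int) (potions : List Int), Dom_max_potions n potions → Spec_max_potions n potions (max_potions n potions)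

-- ===== LEMMAS AND PROOFS =====

-- A's loop counts the prefix of running sums that stays ≥ 0.
theorem maxPotionsLoop_eq (ps : List Int) (cnt h : Int) :
    maxPotionsLoop ps cnt h = cnt + (((prefixSums h ps).takeWhile (fun s => decide (0 ≤ s))).length : Int) := by
  induction ps generalizing cnt h with
  | nil => simp [maxPotionsLoop, prefixSums]
  | cons p ps ih =>
      simp only [maxPotionsLoop, prefixSums, List.takeWhile]
      by_cases hp : h + p ≥ 0
      · simp [hp, ih, List.length_cons]; ring
      · simp [hp]

-- every element of runMins ss (some m) is ≤ m
theorem runMins_le (ss : List Int) (m : Int) :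
    ∀ x ∈ runMins ss (some m), x ≤ m := by
  induction ss generalizing m with
  | nil => simp [runMins]
  | cons s ss ih =>
      intro x hx
      simp only [runMins, List.mem_cons] at hx
      rcases hx with h | h
      · subst h; split <;> omega
      · have := ih (if s < m then s else m) x h
        split at this <;> omega

-- runMins is non-increasing
theorem runMins_pairwise (ss : List Int) (om : Option Int) :
    List.Pairwise (fun a b => b ≤ a) (runMins ss om) := by
  induction ss generalizing om with
  | nil => cases om <;> simp [runMins]
  | cons s ss ih =>
      cases om with
      | none =>
          simp only [runMins, List.pairwise_cons]
          exact ⟨runMins_le ss s, ih (some s)⟩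
      | some m =>
          simp only [runMins, List.pairwise_cons]
          exact ⟨runMins_le ss _, ih _⟩

-- taking the running minimum does not change where the first negative occurs
theorem runMins_takeWhile (ss : List Int) (om : Option Int)
    (h : om = none ∨ ∃ m, om = some m ∧ 0 ≤ m) :
    ((runMins ss om).takeWhile (fun s => decide (0 ≤ s))).length
      = (ss.takeWhile (fun s => decide (0 ≤ s))).length := by
  induction ss generalizing om with
  | nil => cases om <;> simp [runMins]
  | cons s ss ih =>
      by_cases hs : 0 ≤ s
      · rcases h with h | ⟨m, h, hm⟩
        · subst h
          simp only [runMins, List.takeWhile]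
          simp only [hs, decide_true]
          simp [ih (some s) (Or.inr ⟨s, rfl, hs⟩)]
        · subst h
          simp only [runMins, List.takeWhile]
          have hm' : (0:Int) ≤ if s < m then s else m := by split <;> omega
          simp only [hs, hm', decide_true]
          simp [ih (some _) (Or.inr ⟨_, rfl, hm'⟩)]
      · rcases h with h | ⟨m, h, hm⟩
        · subst h
          simp [runMins, List.takeWhile, hs]
        · subst h
          have : s < m := by omega
          simp [runMins, List.takeWhile, hs, this]

-- characterization of the takeWhile length
theorem tw_le (l : List Int) : (l.takeWhile (fun s => decide (0 ≤ s))).length ≤ l.length := by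
  induction l with
  | nil => simp
  | cons s ss ih =>
      by_cases hs : (0:Int) ≤ s
      · simp only [List.takeWhile, hs, decide_true, List.length_cons]; omega
      · simp [List.takeWhile, hs]

theorem tw_pos (l : List Int) :
    ∀ i, i < (l.takeWhile (fun s => decide (0 ≤ s))).length → 0 ≤ l.getD i 0 := by
  induction l with
  | nil => simp
  | cons s ss ih =>
      intro i hi
      by_cases hs : 0 ≤ s
      · simp only [List.takeWhile, hs, decide_true, List.length_cons] at hi
        cases i with
        | zero => simpa using hs
        | succ i => exact ih i (by omega)
      · simp [List.takeWhile, hs] at hi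

theorem tw_stop (l : List Int)
    (h : (l.takeWhile (fun s => decide (0 ≤ s))).length < l.length) :
    l.getD ((l.takeWhile (fun s => decide (0 ≤ s))).length) 0 < 0 := by
  induction l with
  | nil => simp at h
  | cons s ss ih =>
      by_cases hs : 0 ≤ s
      · simp only [List.takeWhile, hs, decide_true, List.length_cons] at h ⊢
        exact ih (by omega)
      · simp [List.takeWhile, hs]; omega

-- binary-search correctness over the characterizing invariant
theorem bsearchNeg_eq (mins : List Int) (tw : Nat)
    (Hpos : ∀ i, i < tw → 0 ≤ mins.getD i 0)
    (Hneg : ∀ i, tw ≤ i → i < mins.length → mins.getD i 0 < 0) :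
    ∀ k lo hi, hi - lo ≤ k → lo ≤ tw → tw ≤ hi → hi ≤ mins.length →
      bsearchNeg mins lo hi = tw := by
  intro k
  induction k with
  | zero =>
      intro lo hi hk h1 h2 h3
      have : ¬ lo < hi := by omega
      unfold bsearchNeg
      simp only [this, dite_false]
      omega
  | succ k ih =>
      intro lo hi hk h1 h2 h3
      by_cases hlt : lo < hi
      · unfold bsearchNeg
        simp only [hlt, dite_true]
        set mid := (lo + hi) / 2 with hmid
        have hmlo : lo ≤ mid := by omega
        have hmhi : mid < hi := by omega
        by_cases hv : mins.getD mid 0 ≥ 0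
        · have : mid < tw := by
            by_contra hc
            have := Hneg mid (by omega) (by omega)
            omega
          simp only [hv, if_true]
          exact ih (mid + 1) hi (by omega) (by omega) h2 h3
        · have : tw ≤ mid := by
            by_contra hc
            have := Hpos mid (by omega)
            omega
          simp only [hv, if_false]
          exact ih lo mid (by omega) h1 (by omega) (by omega)
      · unfold bsearchNeg
        simp only [hlt, dite_false]
        omega

-- the running-min list satisfies the invariant at tw = takeWhile length
theorem getD_antitone (l : List Int) (hp : List.Pairwise (fun a b => b ≤ a) l)
    (i j : Nat) (hij : i ≤ j) (hj : j < l.length) :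
    l.getD j 0 ≤ l.getD i 0 := by
  rcases eq_or_lt_of_le hij with rfl | hij
  · exact le_refl _
  · have h := (List.pairwise_iff_getElem).mp hp i j (by omega) hj hij
    rw [List.getD_eq_getElem l 0 (by omega : i < l.length), List.getD_eq_getElem l 0 hj]
    exact h

theorem max_potions_eq_tw (n : Int) (potions : List Int) :
    max_potions n potions
      = (((prefixSums 0 potions).takeWhile (fun s => decide (0 ≤ s))).length : Int) := by
  unfold max_potions
  simpa using maxPotionsLoop_eq potions 0 0

-- ===== VERDICT (by name: the statement is the Claim_ definition above) =====
theorem max_potions_spec : Claim_equal_max_potions := by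
  intro n potions _
  unfold Spec_max_potions max_potions_alt
  set sums := prefixSums 0 potions with hsums
  set mins := runMins sums none with hmins
  set tw := (mins.takeWhile (fun s => decide (0 ≤ s))).length with htw
  have hsearch : bsearchNeg mins 0 mins.length = tw := by
    apply bsearchNeg_eq mins tw (tw_pos mins)
      (fun i h1 h2 => by
        have h3 := tw_stop mins (by omega)
        rw [← htw] at h3
        have h4 := getD_antitone mins (runMins_pairwise sums none) tw i h1 h2
        omega)
      mins.length 0 mins.length (by omega) (by simp) (tw_le mins)
      (le_refl _)
  simp only [hsearch]
  rw [max_potions_eq_tw n potions, htw, runMins_takeWhile sums none (Or.inl rfl)]
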